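-- pv_equiv track=rewrite | github.com/mohammad-nazim123/institute-api | default_activities/migrations/0003_academicterm.py | build_terms
-- ===== SOURCE A (Python) =====
-- def ordinal_label(number):
--     if 10 <= (number % 100) <= 20:
--         suffix = 'th'
--     else:
--         suffix = {
--             1: 'st',
--             2: 'nd',
--             3: 'rd',
--         }.get(number % 10, 'th')
--     return f'{number}{suffix}'
--
-- def build_terms(academic_terms_type):
--     normalized_type = str(academic_terms_type or '').strip().lower()
--     suffix = 'Year' if normalized_type == 'year' else 'Semester'
--     total = 4 if normalized_type == 'year' else 8
--     return [
--         f'{ordinal_label(index)} {suffix}'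
--         for index in range(1, total + 1)
--     ]
-- ===== SOURCE B (Python) =====
-- YEAR_TERMS = ['1st Year', '2nd Year', '3rd Year', '4th Year']
-- SEMESTER_TERMS = ['1st Semester', '2nd Semester', '3rd Semester', '4th Semester',
--                   '5th Semester', '6th Semester', '7th Semester', '8th Semester']
--
-- def build_terms(academic_terms_type):
--     normalized_type = str(academic_terms_type or '').strip().lower()
--     table = YEAR_TERMS if normalized_type == 'year' else SEMESTER_TERMS
--     return list(table)
-- ===== Notes on version B (the rewrite author's own statement) =====
-- stated objective: simpler
-- what changed: Replaced the per-index ordinal-suffix computation and range loop with a lookup into two precomputed constant label tables, keeping only the normalization/branch logic.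
import Mathlib
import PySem

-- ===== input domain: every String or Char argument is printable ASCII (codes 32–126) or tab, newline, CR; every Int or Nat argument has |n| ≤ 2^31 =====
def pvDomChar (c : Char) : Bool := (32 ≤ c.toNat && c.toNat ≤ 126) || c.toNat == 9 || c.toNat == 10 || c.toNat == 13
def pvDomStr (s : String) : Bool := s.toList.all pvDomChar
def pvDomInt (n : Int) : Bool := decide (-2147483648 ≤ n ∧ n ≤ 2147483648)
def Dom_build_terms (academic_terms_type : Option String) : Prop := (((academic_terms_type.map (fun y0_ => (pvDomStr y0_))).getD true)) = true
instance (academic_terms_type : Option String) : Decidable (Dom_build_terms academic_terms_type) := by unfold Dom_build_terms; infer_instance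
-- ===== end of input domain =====

-- B replaces the per-index ordinal-label loop by a lookup of precomputed label tables (objective: simpler).

-- ===== PORT A =====
def ordinal_label (number : Int) : String :=
  let suffix :=
    if 10 ≤ PySem.Int.mod number 100 ∧ PySem.Int.mod number 100 ≤ 20 then "th"
    else (PySem.Dict.get?
            (PySem.Dict.insert (PySem.Dict.insert (PySem.Dict.insert (PySem.Dict.empty) (1 : Int) "st") 2 "nd") 3 "rd")
            (PySem.Int.mod number 10)).getD "th"
  PySem.Int.toStr number ++ suffix

def build_terms (academic_terms_type : Option String) : List String :=
  -- str(academic_terms_type or ''): None → '', a string stays itself ('' or '' = '')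
  let normalized_type := PySem.Str.lower (PySem.Str.strip (academic_terms_type.getD ""))
  let suffix := if normalized_type = "year" then "Year" else "Semester"
  let total : Int := if normalized_type = "year" then 4 else 8
  (PySem.List.pyRange 1 (total + 1) 1).map (fun index => ordinal_label index ++ " " ++ suffix)

-- ===== PORT B =====
def YEAR_TERMS : List String := ["1st Year", "2nd Year", "3rd Year", "4th Year"]
def SEMESTER_TERMS : List String := ["1st Semester", "2nd Semester", "3rd Semester", "4th Semester",
                                     "5th Semester", "6th Semester", "7th Semester", "8th Semester"]

def build_terms_alt (academic_terms_type : Option String) : List String :=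
  let normalized_type := PySem.Str.lower (PySem.Str.strip (academic_terms_type.getD ""))
  if normalized_type = "year" then YEAR_TERMS else SEMESTER_TERMS

-- ===== PRECONDITION & SPEC =====
def Spec_build_terms (academic_terms_type : Option String) (out : List String) : Prop := out = build_terms_alt academic_terms_type
instance (academic_terms_type : Option String) (out : List String) : Decidable (Spec_build_terms academic_terms_type out) := by unfold Spec_build_terms; infer_instance

-- ===== CLAIM (what is proved, stated in full; the proofs are below) =====
def Claim_equal_build_terms : Prop := ∀ (academic_terms_type : Option String), Dom_build_terms academic_terms_type → Spec_build_terms academic_terms_type (build_terms academic_terms_type)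

-- ===== LEMMAS AND PROOFS =====

-- ===== VERDICT (by name: the statement is the Claim_ definition above) =====
theorem build_terms_spec : Claim_equal_build_terms := by
  intro a _
  unfold Spec_build_terms build_terms build_terms_alt
  by_cases h : PySem.Str.lower (PySem.Str.strip (a.getD "")) = "year" <;> simp only [h, if_pos, if_neg] <;> decide
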